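-- pv_equiv track=rewrite | github.com/Swapn2/dsa-practice | lect38.py | subarray1
-- ===== SOURCE A (Python) =====
-- def subarray1(arr,k):
--     n = len(arr)
--     count = 0
--     for i in range(n):
--         xor = 0
--         for j in range(i, n):
--             xor = xor^arr[j]
--             if xor == k:
--                 count +=1
--     return count
-- ===== SOURCE B (Python) =====
-- def subarray1(arr, k):
--     count = 0
--     pref = 0
--     seen = {0: 1}
--     for x in arr:
--         pref ^= x
--         count += seen.get(pref ^ k, 0)
--         seen[pref] = seen.get(pref, 0) + 1
--     return count
-- ===== Notes on version B (the rewrite author's own statement) =====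
-- stated objective: faster
-- what changed: Replaced the O(n^2) double loop over all subarray start/end pairs by a single pass keeping a hashmap of prefix-XOR counts (ans += seen[pref^k]).
import Mathlib
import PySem

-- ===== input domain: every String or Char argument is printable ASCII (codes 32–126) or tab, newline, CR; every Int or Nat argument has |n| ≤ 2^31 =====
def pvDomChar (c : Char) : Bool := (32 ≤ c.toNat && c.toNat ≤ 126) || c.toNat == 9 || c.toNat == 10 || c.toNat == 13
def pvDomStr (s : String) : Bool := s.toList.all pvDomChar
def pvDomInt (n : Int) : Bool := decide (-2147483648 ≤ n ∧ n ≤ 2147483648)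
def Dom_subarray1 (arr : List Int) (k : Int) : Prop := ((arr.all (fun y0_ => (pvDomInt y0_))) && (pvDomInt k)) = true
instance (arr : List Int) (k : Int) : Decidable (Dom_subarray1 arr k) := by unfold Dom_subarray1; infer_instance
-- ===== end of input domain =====

-- B replaces A's O(n^2) double loop by a single pass with a dict of prefix-XOR counts (objective: faster, asymptotic).

-- ===== PORT A =====
def subarray1 (arr : List Int) (k : Int) : Int :=
  let n : Int := (arr.length : Int)
  (PySem.List.pyRange 0 n 1).foldl (fun count i =>
    ((PySem.List.pyRange i n 1).foldl (fun (st : Int × Int) j =>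
        let x := PySem.Int.bxor st.1 (PySem.List.pyGetD arr j 0)
        (x, if x = k then st.2 + 1 else st.2))
      (0, count)).2) 0

-- ===== PORT B =====
def subarray1_alt (arr : List Int) (k : Int) : Int :=
  (arr.foldl (fun (st : Int × Int × PySem.Dict Int Int) x =>
      let pref := PySem.Int.bxor st.2.1 x
      let count := st.1 + st.2.2.getD (PySem.Int.bxor pref k) 0
      let seen := st.2.2.insert pref (st.2.2.getD pref 0 + 1)
      (count, pref, seen))
    (0, 0, PySem.Dict.empty.insert 0 1)).1

-- ===== PRECONDITION & SPEC =====
def Spec_subarray1 (arr : List Int) (k : Int) (out : Int) : Prop := out = subarray1_alt arr k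
instance (arr : List Int) (k : Int) (out : Int) : Decidable (Spec_subarray1 arr k out) := by unfold Spec_subarray1; infer_instance

-- ===== CLAIM (what is proved, stated in full; the proofs are below) =====
def Claim_equal_subarray1 : Prop := ∀ (arr : List Int) (k : Int), Dom_subarray1 arr k → Spec_subarray1 arr k (subarray1 arr k)

-- ===== LEMMAS AND PROOFS =====

-- `npfx p l` : the running XORs of the nonempty prefixes of `l`, starting from accumulated value `p`.
def npfx (p : Int) : List Int → List Int
  | [] => []
  | x :: xs => PySem.Int.bxor p x :: npfx (PySem.Int.bxor p x) xs

-- number of pairs a < b in the list with L[a] ^ L[b] = k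
def pcount (k : Int) : List Int → Int
  | [] => 0
  | x :: xs => ((xs.countP (fun y => PySem.Int.bxor x y == k)) : Int) + pcount k xs

-- cross pairs: one endpoint in H, the other a future prefix-XOR generated from (p, r)
def crossS (k : Int) (H : List Int) : Int → List Int → Int
  | _, [] => 0
  | p, x :: xs =>
    (H.count (PySem.Int.bxor (PySem.Int.bxor p x) k) : Int) + crossS k H (PySem.Int.bxor p x) xs

-- pairs (s,t): t a future prefix-XOR generated from (p,r), s any prefix-XOR before t (history H grows)
def pext (k : Int) : List Int → Int → List Int → Int
  | _, _, [] => 0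
  | H, p, x :: xs =>
    (H.count (PySem.Int.bxor (PySem.Int.bxor p x) k) : Int) +
      pext k (H ++ [PySem.Int.bxor p x]) (PySem.Int.bxor p x) xs

theorem bxor_oo (m n : Nat) : PySem.Int.bxor (Int.ofNat m) (Int.ofNat n) = Int.ofNat (m ^^^ n) := by
  simp [PySem.Int.bxor]

theorem bxor_on (m n : Nat) : PySem.Int.bxor (Int.ofNat m) (Int.negSucc n) = Int.negSucc (m ^^^ n) := by
  simp [PySem.Int.bxor, Int.negSucc_eq]; omega

theorem bxor_no (m n : Nat) : PySem.Int.bxor (Int.negSucc m) (Int.ofNat n) = Int.negSucc (m ^^^ n) := by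
  simp [PySem.Int.bxor, Int.negSucc_eq]; omega

theorem bxor_nn (m n : Nat) : PySem.Int.bxor (Int.negSucc m) (Int.negSucc n) = Int.ofNat (m ^^^ n) := by
  simp [PySem.Int.bxor, Int.negSucc_eq]; omega

theorem bxor_assoc (a b c : Int) :
    PySem.Int.bxor (PySem.Int.bxor a b) c = PySem.Int.bxor a (PySem.Int.bxor b c) := by
  cases a <;> cases b <;> cases c <;>
    · simp only [bxor_oo, bxor_on, bxor_no, bxor_nn, Nat.xor_assoc]

theorem zero_bxor (a : Int) : PySem.Int.bxor 0 a = a := by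
  rw [PySem.Int.bxor_comm, PySem.Int.bxor_zero]

theorem bxor_left_cancel (a b : Int) : PySem.Int.bxor a (PySem.Int.bxor a b) = b := by
  rw [← bxor_assoc, PySem.Int.bxor_self, zero_bxor]

theorem bxor_eq_iff (a b k : Int) : PySem.Int.bxor a b = k ↔ b = PySem.Int.bxor a k := by
  constructor
  · rintro rfl; rw [bxor_left_cancel]
  · rintro rfl; rw [bxor_left_cancel]

theorem bxor_pair_cancel (c a y : Int) :
    PySem.Int.bxor (PySem.Int.bxor c a) (PySem.Int.bxor c y) = PySem.Int.bxor a y := by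
  rw [bxor_assoc, PySem.Int.bxor_comm c y, ← bxor_assoc a y c,
    PySem.Int.bxor_comm (PySem.Int.bxor a y) c, bxor_left_cancel]

-- ---------- A-side ----------

-- the body of A's inner loop, applied to the current element
def istep (k : Int) (st : Int × Int) (v : Int) : Int × Int :=
  (PySem.Int.bxor st.1 v, if PySem.Int.bxor st.1 v = k then st.2 + 1 else st.2)

theorem inner_fold (k : Int) (l : List Int) (x c : Int) :
    (l.foldl (istep k) (x, c)).2 = c + ((npfx x l).count k : Int) := by
  induction l generalizing x c with
  | nil => simp [npfx]

  | cons a l ih =>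
    simp only [List.foldl_cons, npfx, istep, ih, List.count_cons]
    push_cast
    split_ifs with h <;> simp_all <;> omega

theorem npfx_map (c : Int) (l : List Int) : ∀ p : Int,
    npfx (PySem.Int.bxor c p) l = (npfx p l).map (PySem.Int.bxor c) := by
  induction l with
  | nil => intro p; simp [npfx]
  | cons x xs ih =>
    intro p
    simp only [npfx, List.map_cons, bxor_assoc, ih (PySem.Int.bxor p x)]

theorem pcount_map (k c : Int) (L : List Int) :
    pcount k (L.map (PySem.Int.bxor c)) = pcount k L := by
  induction L with
  | nil => rfl
  | cons a L ih =>
    simp only [List.map_cons, pcount, ih, List.countP_map]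
    congr 1
    apply congrArg
    apply List.countP_congr
    intro y _
    simp [Function.comp, bxor_pair_cancel]

theorem S_cons (k x : Int) (xs : List Int) :
    pcount k (0 :: npfx 0 (x :: xs))
      = ((npfx 0 (x :: xs)).count k : Int) + pcount k (0 :: npfx 0 xs) := by
  have hmap : (x :: npfx x xs) = (0 :: npfx 0 xs).map (PySem.Int.bxor x) := by
    have := npfx_map x xs 0
    rw [PySem.Int.bxor_zero] at this
    simp [this, PySem.Int.bxor_zero]
  have h0 : npfx 0 (x :: xs) = x :: npfx x xs := by
    simp [npfx, zero_bxor]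
  rw [h0]
  show ((x :: npfx x xs).countP (fun y => PySem.Int.bxor 0 y == k) : Int)
      + pcount k (x :: npfx x xs) = _
  rw [hmap, pcount_map]
  congr 1
  simp [List.count, zero_bxor]

theorem outer_fold (arr : List Int) (k : Int) : ∀ (m i : Nat), arr.length - i ≤ m → ∀ c : Int,
    (PySem.List.pyRange (i : Int) (arr.length : Int) 1).foldl (fun count ival =>
        ((PySem.List.pyRange ival (arr.length : Int) 1).foldl (fun (st : Int × Int) j =>
            let t := PySem.Int.bxor st.1 (PySem.List.pyGetD arr j 0)
            (t, if t = k then st.2 + 1 else st.2)) (0, count)).2) c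
      = c + pcount k (0 :: npfx 0 (arr.drop i)) := by
  intro m
  induction m with
  | zero =>
    intro i hi c
    have hlen : arr.length ≤ i := by omega
    rw [PySem.List.pyRange_one_eq_nil (by exact_mod_cast hlen), List.drop_eq_nil_of_le hlen]
    simp [pcount, npfx]
  | succ m ihm =>
    intro i hi c
    by_cases hlt : i < arr.length
    · rw [PySem.List.pyRange_one_cons (by exact_mod_cast hlt), List.foldl_cons]
      have hin : ((PySem.List.pyRange (i : Int) ((arr.length : Int)) 1).foldl
            (fun (st : Int × Int) j =>
              let t := PySem.Int.bxor st.1 (PySem.List.pyGetD arr j 0)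
              (t, if t = k then st.2 + 1 else st.2)) (0, c)).2
          = c + ((npfx 0 (arr.drop i)).count k : Int) := by
        have hfold := PySem.List.foldl_pyRange_pyGetD' arr 0 (istep k) ((0 : Int), c)
          (a := (i : Int)) (by positivity)
        have : ((PySem.List.pyRange (i : Int) ((arr.length : Int)) 1).foldl
              (fun (st : Int × Int) j =>
                let t := PySem.Int.bxor st.1 (PySem.List.pyGetD arr j 0)
                (t, if t = k then st.2 + 1 else st.2)) (0, c))
            = (arr.drop ((i : Int)).toNat).foldl (istep k) (0, c) := hfold
        rw [this, Int.toNat_natCast]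
        exact inner_fold k (arr.drop i) 0 c
      rw [hin]
      have hcast : ((i : Int) + 1) = ((i + 1 : Nat) : Int) := by push_cast; ring
      rw [hcast, ihm (i + 1) (by omega)]
      have hdrop : arr.drop i = arr[i] :: arr.drop (i + 1) := List.drop_eq_getElem_cons hlt
      rw [hdrop, S_cons, ← hdrop]
      ring
    · have hlen : arr.length ≤ i := by omega
      rw [PySem.List.pyRange_one_eq_nil (by exact_mod_cast hlen), List.drop_eq_nil_of_le hlen]
      simp [pcount, npfx]

-- ---------- B-side ----------

theorem b_loop (k : Int) (l : List Int) : ∀ (H : List Int) (cnt : PySem.Dict Int Int) (c p : Int),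
    (∀ v : Int, cnt.getD v 0 = (H.count v : Int)) →
    ((l.foldl (fun (st : Int × Int × PySem.Dict Int Int) x =>
        let pref := PySem.Int.bxor st.2.1 x
        let count := st.1 + st.2.2.getD (PySem.Int.bxor pref k) 0
        let seen := st.2.2.insert pref (st.2.2.getD pref 0 + 1)
        (count, pref, seen)) (c, p, cnt)).1
      = c + pext k H p l) := by
  induction l with
  | nil => intro H cnt c p _; simp [pext]
  | cons x xs ih =>
    intro H cnt c p hc
    simp only [List.foldl_cons]
    have step :
        (List.foldl (fun (st : Int × Int × PySem.Dict Int Int) x =>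
            let pref := PySem.Int.bxor st.2.1 x
            let count := st.1 + st.2.2.getD (PySem.Int.bxor pref k) 0
            let seen := st.2.2.insert pref (st.2.2.getD pref 0 + 1)
            (count, pref, seen))
          (c + cnt.getD (PySem.Int.bxor (PySem.Int.bxor p x) k) 0, PySem.Int.bxor p x,
            cnt.insert (PySem.Int.bxor p x) (cnt.getD (PySem.Int.bxor p x) 0 + 1)) xs).1
        = (c + cnt.getD (PySem.Int.bxor (PySem.Int.bxor p x) k) 0)
            + pext k (H ++ [PySem.Int.bxor p x]) (PySem.Int.bxor p x) xs := by
      apply ih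
      intro v
      rw [PySem.Dict.getD_insert]
      by_cases hv : v = PySem.Int.bxor p x
      · subst hv
        rw [hc, List.count_append, List.count_singleton]
        simp
      · rw [if_neg hv, hc, List.count_append, List.count_singleton]
        simp [Ne.symm hv]
    exact step.trans (by rw [hc, pext]; ring)

theorem pext_append (k : Int) (r : List Int) : ∀ (H1 H2 : List Int) (p : Int),
    pext k (H1 ++ H2) p r = crossS k H1 p r + pext k H2 p r := by
  induction r with
  | nil => intro H1 H2 p; simp [pext, crossS]
  | cons x xs ih =>
    intro H1 H2 p
    simp only [pext, crossS, List.count_append, List.append_assoc,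
      ih H1 (H2 ++ [PySem.Int.bxor p x])]
    push_cast
    ring

theorem crossS_singleton (k q : Int) (r : List Int) : ∀ p : Int,
    crossS k [q] p r = ((npfx p r).countP (fun t => PySem.Int.bxor t k == q) : Int) := by
  induction r with
  | nil => intro p; simp [crossS, npfx]
  | cons x xs ih =>
    intro p
    simp only [crossS, npfx, List.countP_cons, ih (PySem.Int.bxor p x)]
    push_cast
    simp only [List.count_singleton, beq_iff_eq]
    rw [add_comm]
    congr 1
    by_cases h : PySem.Int.bxor (PySem.Int.bxor p x) k = q
    · subst h; simp
    · simp [h, Ne.symm h]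

theorem bxor_swap_eq (p t k : Int) :
    PySem.Int.bxor t k = p ↔ PySem.Int.bxor p t = k := by
  rw [bxor_eq_iff t k p, eq_comm, PySem.Int.bxor_comm t p]

theorem bxor_right_comm (a b c : Int) :
    PySem.Int.bxor (PySem.Int.bxor a b) c = PySem.Int.bxor (PySem.Int.bxor a c) b := by
  rw [bxor_assoc, bxor_assoc, PySem.Int.bxor_comm b c]

theorem pext_eq_pcount (k : Int) (r : List Int) : ∀ p : Int,
    pext k [p] p r = pcount k (p :: npfx p r) := by
  induction r with
  | nil => intro p; simp [pext, pcount, npfx]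
  | cons x xs ih =>
    intro p
    have hsplit : pext k [p, PySem.Int.bxor p x] (PySem.Int.bxor p x) xs
        = crossS k [p] (PySem.Int.bxor p x) xs + pext k [PySem.Int.bxor p x] (PySem.Int.bxor p x) xs :=
      pext_append k xs [p] [PySem.Int.bxor p x] (PySem.Int.bxor p x)
    simp only [pext, List.cons_append, List.nil_append] at hsplit ⊢
    rw [hsplit, ih (PySem.Int.bxor p x)]
    simp only [pcount, npfx, List.countP_cons]
    rw [crossS_singleton]
    have hhead : ([p].count (PySem.Int.bxor (PySem.Int.bxor p x) k) : Int)
        = ((if PySem.Int.bxor p (PySem.Int.bxor p x) == k then 1 else 0 : Nat) : Int) := by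
      have e1 : p = PySem.Int.bxor (PySem.Int.bxor p x) k ↔ x = k := by
        rw [eq_comm, bxor_eq_iff, bxor_right_comm, PySem.Int.bxor_self, zero_bxor, eq_comm]
      rw [bxor_left_cancel]
      simp only [List.count_singleton, beq_iff_eq]
      simp only [e1]
    have hcp : (npfx (PySem.Int.bxor p x) xs).countP (fun t => PySem.Int.bxor t k == p)
        = (npfx (PySem.Int.bxor p x) xs).countP (fun y => PySem.Int.bxor p y == k) := by
      apply List.countP_congr
      intro y _
      rw [Bool.eq_iff_iff]
      simp [bxor_swap_eq p y k]
    rw [hcp, hhead]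
    push_cast
    ring

-- ===== VERDICT (by name: the statement is the Claim_ definition above) =====
theorem subarray1_spec : Claim_equal_subarray1 := by
  intro arr k _
  unfold Spec_subarray1
  have hA : subarray1 arr k = pcount k (0 :: npfx 0 arr) := by
    unfold subarray1
    have h := outer_fold arr k arr.length 0 (by omega) 0
    simpa using h
  have hB : subarray1_alt arr k = pcount k (0 :: npfx 0 arr) := by
    unfold subarray1_alt
    have hc : ∀ v : Int,
        (PySem.Dict.empty.insert (0 : Int) (1 : Int)).getD v 0 = ((([0] : List Int).count v : Nat) : Int) := by
      intro v
      rw [PySem.Dict.getD_insert]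
      by_cases hv : v = 0
      · subst hv; simp
      · simp [hv, PySem.Dict.getD_empty, Ne.symm hv]
    rw [b_loop k arr [0] _ 0 0 hc, pext_eq_pcount]
    ring
  rw [hA, hB]
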